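-- pv_equiv track=rewrite | github.com/advaithasabnis/advent-of-code | advent_of_code/year2021/day05/part1.py | vent_count
-- ===== SOURCE A (Python) =====
-- from collections import defaultdict
--
-- def vent_count(coords):
--     vent_count = defaultdict(int)
--     for (x1, y1), (x2, y2) in coords:
--         if x1 == x2:
--             y1, y2 = sorted((y1, y2))
--             for i in range(y1, y2 + 1):
--                 vent_count[(x1, i)] += 1
--         elif y1 == y2:
--             x1, x2 = sorted((x1, x2))
--             for i in range(x1, x2 + 1):
--                 vent_count[(i, y1)] += 1
--     return vent_count
-- ===== SOURCE B (Python) =====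
-- from collections import Counter, defaultdict
--
--
-- def _seg_counter(seg):
--     # Counter of the lattice points of one horizontal/vertical segment
--     (x1, y1), (x2, y2) = seg
--     if x1 == x2:
--         lo, hi = min(y1, y2), max(y1, y2)
--         return Counter((x1, y) for y in range(lo, hi + 1))
--     if y1 == y2:
--         lo, hi = min(x1, x2), max(x1, x2)
--         return Counter((x, y1) for x in range(lo, hi + 1))
--     return Counter()  # diagonal segments are ignored in part 1
--
--
-- def _merge(counters):
--     # divide-and-conquer reduction; merging keeps left order, appends new keys
--     if not counters:
--         return Counter()
--     if len(counters) == 1: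
--         return counters[0]
--     mid = len(counters) // 2
--     left = _merge(counters[:mid])
--     right = _merge(counters[mid:])
--     for k, v in right.items():
--         left[k] += v
--     return left
--
--
-- def vent_count(coords):
--     out = defaultdict(int)
--     out.update(_merge([_seg_counter(seg) for seg in coords]))
--     return out
-- ===== Notes on version B (the rewrite author's own statement) =====
-- stated objective: alternative
-- what changed: A's single mutable dict incremented point-by-point inside two sort-then-range branches is replaced by a map-reduce: each segment is mapped to its own Counter of lattice points, and the per-segment counters are combined by a recursive divide-and-conquer merge (left order kept, new keys appended, values added).
import Mathlib
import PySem

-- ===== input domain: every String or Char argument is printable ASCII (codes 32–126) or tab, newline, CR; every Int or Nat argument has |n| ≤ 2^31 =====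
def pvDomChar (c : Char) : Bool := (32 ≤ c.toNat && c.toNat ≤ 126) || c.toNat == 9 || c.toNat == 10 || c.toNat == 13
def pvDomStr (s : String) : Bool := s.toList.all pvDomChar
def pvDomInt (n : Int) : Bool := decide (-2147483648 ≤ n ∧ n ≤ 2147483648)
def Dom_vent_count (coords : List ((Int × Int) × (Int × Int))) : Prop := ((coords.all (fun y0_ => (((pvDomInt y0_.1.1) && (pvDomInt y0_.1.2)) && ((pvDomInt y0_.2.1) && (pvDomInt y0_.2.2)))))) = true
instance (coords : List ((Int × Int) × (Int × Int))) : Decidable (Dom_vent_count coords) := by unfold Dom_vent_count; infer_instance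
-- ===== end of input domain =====

-- B replaces A's single sequentially-incremented dict by a map-reduce: one Counter per
-- segment, combined by a recursive divide-and-conquer merge (objective: alternative).

-- ===== PORT A =====
def vent_count (coords : List ((Int × Int) × (Int × Int))) : List (Int × Int × Int) :=
  let d := coords.foldl (fun (d : PySem.Dict (Int × Int) Int) seg =>
    match seg with
    | ((x1, y1), (x2, y2)) =>
      if x1 = x2 then
        -- y1, y2 = sorted((y1, y2))
        let y1' := min y1 y2
        let y2' := max y1 y2
        (PySem.List.pyRange y1' (y2' + 1) 1).foldl
          (fun d i => d.modify (x1, i) 0 (· + 1)) d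
      else if y1 = y2 then
        let x1' := min x1 x2
        let x2' := max x1 x2
        (PySem.List.pyRange x1' (x2' + 1) 1).foldl
          (fun d i => d.modify (i, y1) 0 (· + 1)) d
      else d) PySem.Dict.empty
  d.items.map (fun p => (p.1.1, p.1.2, p.2))

-- ===== PORT B =====
-- _seg_counter: Counter of the lattice points of one horizontal/vertical segment
def segCounter (seg : (Int × Int) × (Int × Int)) : PySem.Dict (Int × Int) Int :=
  match seg with
  | ((x1, y1), (x2, y2)) =>
    if x1 = x2 then
      PySem.Dict.counter ((PySem.List.pyRange (min y1 y2) (max y1 y2 + 1) 1).map (fun y => (x1, y)))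
    else if y1 = y2 then
      PySem.Dict.counter ((PySem.List.pyRange (min x1 x2) (max x1 x2 + 1) 1).map (fun x => (x, y1)))
    else PySem.Dict.empty

-- 'for k, v in right.items(): left[k] += v'
def mergeInto (l r : PySem.Dict (Int × Int) Int) : PySem.Dict (Int × Int) Int :=
  r.items.foldl (fun d p => d.modify p.1 0 (· + p.2)) l

-- _merge: divide-and-conquer reduction of the list of counters
def mergeAll : List (PySem.Dict (Int × Int) Int) → PySem.Dict (Int × Int) Int
  | [] => PySem.Dict.empty
  | [c] => c
  | c₀ :: c₁ :: rest =>
    let cs := c₀ :: c₁ :: rest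
    let mid := cs.length / 2
    mergeInto (mergeAll (cs.take mid)) (mergeAll (cs.drop mid))
  termination_by cs => cs.length
  decreasing_by all_goals simp_all [List.length_take, List.length_drop]; omega

def vent_count_alt (coords : List ((Int × Int) × (Int × Int))) : List (Int × Int × Int) :=
  (mergeAll (coords.map segCounter)).items.map (fun p => (p.1.1, p.1.2, p.2))

-- ===== PRECONDITION & SPEC =====
def Spec_vent_count (coords : List ((Int × Int) × (Int × Int))) (out : List (Int × Int × Int)) : Prop := out = vent_count_alt coords
instance (coords : List ((Int × Int) × (Int × Int))) (out : List (Int × Int × Int)) : Decidable (Spec_vent_count coords out) := by unfold Spec_vent_count; infer_instance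

-- ===== CLAIM (what is proved, stated in full; the proofs are below) =====
def Claim_equal_vent_count : Prop := ∀ (coords : List ((Int × Int) × (Int × Int))), Dom_vent_count coords → Spec_vent_count coords (vent_count coords)

-- ===== LEMMAS AND PROOFS =====

-- the point list of one segment, in A's branch structure
def pts (seg : (Int × Int) × (Int × Int)) : List (Int × Int) :=
  match seg with
  | ((x1, y1), (x2, y2)) =>
    if x1 = x2 then (PySem.List.pyRange (min y1 y2) (max y1 y2 + 1) 1).map (fun y => (x1, y))
    else if y1 = y2 then (PySem.List.pyRange (min x1 x2) (max x1 x2 + 1) 1).map (fun x => (x, y1))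
    else []

theorem segCounter_eq_counter_pts (seg : (Int × Int) × (Int × Int)) :
    segCounter seg = PySem.Dict.counter (pts seg) := by
  obtain ⟨⟨x1, y1⟩, ⟨x2, y2⟩⟩ := seg
  simp only [segCounter, pts]
  split_ifs <;> rfl

-- A's nested loops, flattened into one fold over the concatenated point stream
theorem vent_fold_flat (coords : List ((Int × Int) × (Int × Int)))
    (d : PySem.Dict (Int × Int) Int) :
    coords.foldl (fun (d : PySem.Dict (Int × Int) Int) seg =>
      match seg with
      | ((x1, y1), (x2, y2)) =>
        if x1 = x2 then
          (PySem.List.pyRange (min y1 y2) (max y1 y2 + 1) 1).foldl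
            (fun d i => d.modify (x1, i) 0 (· + 1)) d
        else if y1 = y2 then
          (PySem.List.pyRange (min x1 x2) (max x1 x2 + 1) 1).foldl
            (fun d i => d.modify (i, y1) 0 (· + 1)) d
        else d) d
    = (coords.flatMap pts).foldl (fun d p => d.modify p 0 (· + 1)) d := by
  induction coords generalizing d with
  | nil => simp
  | cons seg rest ih =>
    obtain ⟨⟨x1, y1⟩, ⟨x2, y2⟩⟩ := seg
    rw [List.flatMap_cons, List.foldl_append, List.foldl_cons, ih]
    congr 1
    simp only [pts]
    split_ifs <;> simp [List.foldl_map]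

-- two modifies at the same key collapse
theorem modify_modify_self (d : PySem.Dict (Int × Int) Int) (p : Int × Int) (f g : Int → Int) :
    (d.modify p 0 f).modify p 0 g = d.modify p 0 (fun x => g (f x)) := by
  simp [PySem.Dict.modify, PySem.Dict.getD_insert_self, PySem.Dict.insert_insert_self]

-- a modify at p commutes past a modify at k ≠ p when p is already a key
theorem modify_comm (d : PySem.Dict (Int × Int) Int) (k p : Int × Int) (hne : k ≠ p)
    (hp : d.contains p = true) (f g : Int → Int) :
    (d.modify k 0 f).modify p 0 g = (d.modify p 0 g).modify k 0 f := by
  have getD1 : (d.insert k (f (d.getD k 0))).getD p 0 = d.getD p 0 :=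
    PySem.Dict.getD_insert_of_ne _ _ _ (Ne.symm hne)
  have getD2 : (d.insert p (g (d.getD p 0))).getD k 0 = d.getD k 0 :=
    PySem.Dict.getD_insert_of_ne _ _ _ hne
  simp only [PySem.Dict.modify, getD1, getD2]
  -- insert-commute: p is already a key of d, so its update is in place
  apply PySem.Dict.ext
  rw [PySem.Dict.items_insert, PySem.Dict.items_insert, PySem.Dict.items_insert,
    PySem.Dict.items_insert]
  by_cases hk : d.contains k = true
  · simp only [PySem.Dict.contains_insert, hk, hp, Bool.or_true, if_true, List.map_map]
    apply List.map_congr_left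
    intro q _
    by_cases h1 : q.1 = k <;> by_cases h2 : q.1 = p <;> simp_all [Function.comp]
  · simp only [Bool.not_eq_true] at hk
    have c1 : (d.insert k (f (d.getD k 0))).contains p = true := by
      simp [PySem.Dict.contains_insert, hp]
    have c2 : (d.insert p (g (d.getD p 0))).contains k = false := by
      simp [PySem.Dict.contains_insert, hk, hne]
    rw [c1, c2]
    simp only [if_true, Bool.false_eq_true, if_false]
    simp only [hk, hp, if_true, Bool.false_eq_true, if_false, List.map_append,
      List.map_cons, List.map_nil, beq_iff_eq, hne]

-- pull a modify at p through a fold whose keys avoid p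
theorem foldl_modify_comm (L : List ((Int × Int) × Int)) (d : PySem.Dict (Int × Int) Int)
    (p : Int × Int) (g : Int → Int) (hL : ∀ q ∈ L, q.1 ≠ p) (hp : d.contains p = true) :
    (L.foldl (fun d q => d.modify q.1 0 (· + q.2)) d).modify p 0 g
      = L.foldl (fun d q => d.modify q.1 0 (· + q.2)) (d.modify p 0 g) := by
  induction L generalizing d with
  | nil => rfl
  | cons q rest ih =>
    simp only [List.foldl_cons]
    rw [ih _ (fun r hr => hL r (List.mem_cons_of_mem _ hr))
        (by rw [PySem.Dict.contains_modify]; simp [hp]),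
      modify_comm _ _ _ (hL q (List.mem_cons_self)) hp]

-- folding the merge step over items in which p's value was bumped by one
theorem foldl_items_bump (p : Int × Int) (v : Int) :
    ∀ (L : List ((Int × Int) × Int)) (d : PySem.Dict (Int × Int) Int),
      (L.map (·.1)).Nodup → (p, v) ∈ L →
      (L.map (fun q => if (q.1 == p) = true then (p, v + 1) else q)).foldl
          (fun d q => d.modify q.1 0 (· + q.2)) d
        = (L.foldl (fun d q => d.modify q.1 0 (· + q.2)) d).modify p 0 (· + 1) := by
  intro L
  induction L with
  | nil => intro d _ h; cases h
  | cons q rest ih =>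
    intro d hnd hmem
    obtain ⟨k, w⟩ := q
    simp only [List.map_cons, List.nodup_cons] at hnd
    by_cases hk : k = p
    · subst hk
      have hrest : ∀ r ∈ rest, r.1 ≠ k := by
        intro r hr h; exact hnd.1 (h ▸ List.mem_map_of_mem hr)
      have hv : w = v := by
        rcases List.mem_cons.mp hmem with h | h
        · injection h with h1 h2; exact h2.symm
        · exact absurd rfl (hrest _ h)
      subst hv
      simp only [List.foldl_cons, beq_self_eq_true, if_true, List.map_cons]
      have hmapid : rest.map (fun q => if (q.1 == k) = true then (k, w + 1) else q) = rest := by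
        rw [List.map_congr_left (g := id) ?_, List.map_id]
        intro r hr
        simp [hrest r hr]
      rw [hmapid,
        foldl_modify_comm rest _ k _ hrest (by rw [PySem.Dict.contains_modify]; simp),
        modify_modify_self]
      have hfun : (fun x : Int => x + w + 1) = fun x => x + (w + 1) := by funext x; ring
      rw [hfun]
    · have hmem' : (p, v) ∈ rest := by
        rcases List.mem_cons.mp hmem with h | h
        · cases h; exact absurd rfl hk
        · exact h
      simp only [List.foldl_cons, List.map_cons]
      rw [if_neg (by simp [hk])]
      exact ih _ hnd.2 hmem'

-- the merge loop absorbs one extra count at p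
theorem mergeInto_modify (d c : PySem.Dict (Int × Int) Int) (p : Int × Int)
    (hc : c.keys.Nodup) :
    mergeInto d (c.modify p 0 (· + 1)) = (mergeInto d c).modify p 0 (· + 1) := by
  simp only [mergeInto]
  by_cases cp : c.contains p = true
  · obtain ⟨v, hv⟩ : ∃ v, c.get? p = some v := by
      rw [PySem.Dict.contains_eq_isSome_get?] at cp
      exact Option.isSome_iff_exists.mp cp
    have hgd : c.getD p 0 = v := PySem.Dict.getD_of_get?_eq_some _ _ hv
    have hmem : (p, v) ∈ c.items := PySem.Dict.mem_items_of_get?_eq_some _ hv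
    rw [show c.modify p 0 (· + 1) = c.insert p (v + 1) by
        simp [PySem.Dict.modify, hgd]]
    rw [PySem.Dict.items_insert_of_contains _ _ cp]
    exact foldl_items_bump p v c.items d hc hmem
  · simp only [Bool.not_eq_true] at cp
    have hgd : c.getD p 0 = 0 := PySem.Dict.getD_of_not_contains _ _ cp
    rw [show c.modify p 0 (· + 1) = c.insert p (0 + 1) by
        simp [PySem.Dict.modify, hgd]]
    rw [PySem.Dict.items_insert_of_not_contains _ _ cp, List.foldl_append]
    simp only [List.foldl_cons, List.foldl_nil, zero_add]

-- sequentially counting a stream into d IS merging the stream's Counter into d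
theorem foldl_inc_eq_mergeInto_counter (l : List (Int × Int)) (d : PySem.Dict (Int × Int) Int) :
    l.foldl (fun d p => d.modify p 0 (· + 1)) d = mergeInto d (PySem.Dict.counter l) := by
  induction l using List.reverseRecOn with
  | nil => rfl
  | append_singleton l p ih =>
    rw [List.foldl_append, List.foldl_cons, List.foldl_nil, ih,
      PySem.Dict.counter_append_singleton,
      mergeInto_modify d _ p (PySem.Dict.nodup_keys_counter l)]

theorem counter_append (u v : List (Int × Int)) :
    PySem.Dict.counter (u ++ v) = mergeInto (PySem.Dict.counter u) (PySem.Dict.counter v) := by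
  rw [PySem.Dict.counter_eq_foldl, List.foldl_append, ← PySem.Dict.counter_eq_foldl,
    foldl_inc_eq_mergeInto_counter]

-- divide-and-conquer merge of per-list counters is the counter of the concatenation
theorem mergeAll_counters_aux : ∀ (n : Nat) (pss : List (List (Int × Int))), pss.length ≤ n →
    mergeAll (pss.map PySem.Dict.counter) = PySem.Dict.counter pss.flatten := by
  intro n
  induction n with
  | zero =>
    intro pss h
    have : pss = [] := List.eq_nil_of_length_eq_zero (Nat.le_zero.mp h)
    subst this; simp [mergeAll]; rfl
  | succ n ih =>
    intro pss h
    match pss with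
    | [] => simp [mergeAll]; rfl
    | [ps] => simp [mergeAll]
    | ps₀ :: ps₁ :: rest =>
      simp only [List.map_cons]
      rw [mergeAll]
      simp only [← List.map_cons, ← List.map_take, ← List.map_drop, List.length_map]
      have hlen : (ps₀ :: ps₁ :: rest).length = rest.length + 2 := by simp
      set L := (ps₀ :: ps₁ :: rest).length with hL
      have hmid1 : 1 ≤ L / 2 := by omega
      have hmid2 : L / 2 < L := by omega
      rw [ih _ (by simp [List.length_take]; omega),
          ih _ (by simp [List.length_drop]; omega),
          ← counter_append, ← List.flatten_append, List.take_append_drop]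

theorem mergeAll_counters (pss : List (List (Int × Int))) :
    mergeAll (pss.map PySem.Dict.counter) = PySem.Dict.counter pss.flatten :=
  mergeAll_counters_aux pss.length pss (Nat.le_refl _)

-- ===== VERDICT (by name: the statement is the Claim_ definition above) =====
theorem vent_count_spec : Claim_equal_vent_count := by
  intro coords _
  unfold Spec_vent_count vent_count vent_count_alt
  rw [vent_fold_flat coords PySem.Dict.empty]
  have h1 : coords.map segCounter = (coords.map pts).map PySem.Dict.counter := by
    simp [List.map_map, segCounter_eq_counter_pts, Function.comp]
  rw [h1, mergeAll_counters, ← PySem.Dict.counter_eq_foldl, List.flatMap_def]
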